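-- pv_equiv track=rewrite | github.com/Xinglab/scCirRL-seq | scCirRL/allele_specific_expression.py | get_hap
-- ===== SOURCE A (Python) =====
-- from collections import defaultdict as dd
--
-- def get_hap(qnames, read_to_hap, trans_id, gene_name):
--     hap_to_read_cnt = dd(lambda: 0)
--     for qname in qnames:
--         if qname in read_to_hap:
--             hap_to_read_cnt[read_to_hap[qname]] += 1
--
--     hap_to_read_cnt = dict(sorted(hap_to_read_cnt.items(), key=lambda d: -d[1]))
--     if len(hap_to_read_cnt) == 0:  # no hap
--         return 'none'
--     elif len(hap_to_read_cnt) > 1:  # 2 haps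
--         if list(hap_to_read_cnt.values())[0] > list(hap_to_read_cnt.values())[1]:
--             return list(hap_to_read_cnt.keys())[0]
--         else:
--             return 'none'
--     else:  # 1 hap
--         return list(hap_to_read_cnt.keys())[0]
-- ===== SOURCE B (Python) =====
-- from collections import Counter
--
-- def get_hap(qnames, read_to_hap, trans_id, gene_name):
--     counts = Counter(read_to_hap[q] for q in qnames if q in read_to_hap)
--     if not counts:
--         return 'none'
--     m = max(counts.values())
--     top = [h for h, c in counts.items() if c == m]
--     return top[0] if len(top) == 1 else 'none'
-- ===== Notes on version B (the rewrite author's own statement) =====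
-- stated objective: simpler
-- what changed: Replaces the sort-by-descending-count and positional top-vs-second comparison with a max over the counts plus a uniqueness-of-max check (Counter, max, filter).
import Mathlib
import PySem

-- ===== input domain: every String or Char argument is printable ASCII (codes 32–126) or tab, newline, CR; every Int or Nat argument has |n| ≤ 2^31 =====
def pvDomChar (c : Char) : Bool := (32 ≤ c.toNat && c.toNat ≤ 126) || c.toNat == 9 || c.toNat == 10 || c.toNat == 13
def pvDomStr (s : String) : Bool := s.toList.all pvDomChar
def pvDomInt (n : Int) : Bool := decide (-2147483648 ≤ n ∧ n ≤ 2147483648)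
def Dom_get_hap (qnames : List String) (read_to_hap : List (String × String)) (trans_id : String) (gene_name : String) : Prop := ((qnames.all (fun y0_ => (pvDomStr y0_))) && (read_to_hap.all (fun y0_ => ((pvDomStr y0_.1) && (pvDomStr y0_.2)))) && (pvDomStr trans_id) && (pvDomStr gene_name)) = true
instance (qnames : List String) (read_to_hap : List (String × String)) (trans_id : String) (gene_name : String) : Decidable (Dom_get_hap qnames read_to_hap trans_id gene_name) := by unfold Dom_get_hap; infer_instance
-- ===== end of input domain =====

-- B replaces A's sort-by-descending-count + top-vs-second comparison by a max plus a
-- uniqueness-of-max check: simpler, no sort.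

-- ===== PORT A =====
def get_hap (qnames : List String) (read_to_hap : List (String × String)) (trans_id : String) (gene_name : String) : String :=
  let rd : PySem.Dict String String := PySem.Dict.ofList read_to_hap
  let hap_to_read_cnt : PySem.Dict String Int :=
    qnames.foldl (fun d qname =>
      if rd.contains qname then d.modify (rd.getD qname "") 0 (· + 1) else d)
      PySem.Dict.empty
  let items := PySem.List.sorted hap_to_read_cnt.items (fun d => -d.2) false
  if items.length = 0 then "none"
  else if items.length > 1 then
    if (items.map Prod.snd).getD 0 0 > (items.map Prod.snd).getD 1 0 then
      (items.map Prod.fst).getD 0 ""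
    else "none"
  else (items.map Prod.fst).getD 0 ""

-- ===== PORT B =====
def get_hap_alt (qnames : List String) (read_to_hap : List (String × String)) (trans_id : String) (gene_name : String) : String :=
  let rd : PySem.Dict String String := PySem.Dict.ofList read_to_hap
  let counts : PySem.Dict String Int :=
    PySem.Dict.counter ((qnames.filter (fun q => rd.contains q)).map (fun q => rd.getD q ""))
  if counts.size = 0 then "none"
  else
    let m := (PySem.List.max? counts.values (fun y => y)).getD 0
    let top := (counts.items.filter (fun p => p.2 == m)).map Prod.fst
    if top.length = 1 then top.getD 0 "" else "none"

-- ===== PRECONDITION & SPEC =====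
def Spec_get_hap (qnames : List String) (read_to_hap : List (String × String)) (trans_id : String) (gene_name : String) (out : String) : Prop := out = get_hap_alt qnames read_to_hap trans_id gene_name
instance (qnames : List String) (read_to_hap : List (String × String)) (trans_id : String) (gene_name : String) (out : String) : Decidable (Spec_get_hap qnames read_to_hap trans_id gene_name out) := by unfold Spec_get_hap; infer_instance

-- ===== CLAIM (what is proved, stated in full; the proofs are below) =====
def Claim_equal_get_hap : Prop := ∀ (qnames : List String) (read_to_hap : List (String × String)) (trans_id : String) (gene_name : String), Dom_get_hap qnames read_to_hap trans_id gene_name → Spec_get_hap qnames read_to_hap trans_id gene_name (get_hap qnames read_to_hap trans_id gene_name)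

-- ===== LEMMAS AND PROOFS =====

-- A's counting loop builds exactly Counter([rd[q] for q in qnames if q in rd]).
theorem count_loop_eq (rd : PySem.Dict String String) (qnames : List String)
    (d : PySem.Dict String Int) :
    qnames.foldl (fun d qname =>
      if rd.contains qname then d.modify (rd.getD qname "") 0 (· + 1) else d) d
    = ((qnames.filter (fun q => rd.contains q)).map (fun q => rd.getD q "")).foldl
        (fun d x => d.modify x 0 (· + 1)) d := by
  induction qnames generalizing d with
  | nil => rfl
  | cons q t ih =>
    simp only [List.foldl_cons, List.filter_cons]
    by_cases h : rd.contains q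
    · simp [h, ih]
    · simp [h, ih]

-- The decision rules agree on any items list.
theorem decide_eq (l : List (String × Int)) :
    (if (PySem.List.sorted l (fun d => -d.2) false).length = 0 then "none"
     else
       if (PySem.List.sorted l (fun d => -d.2) false).length > 1 then
         if (List.map Prod.snd (PySem.List.sorted l (fun d => -d.2) false)).getD 0 0 >
             (List.map Prod.snd (PySem.List.sorted l (fun d => -d.2) false)).getD 1 0 then
           (List.map Prod.fst (PySem.List.sorted l (fun d => -d.2) false)).getD 0 ""
         else "none"
       else (List.map Prod.fst (PySem.List.sorted l (fun d => -d.2) false)).getD 0 "")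
    = if l.length = 0 then "none"
      else
        if (List.map Prod.fst (List.filter (fun p =>
              p.2 == (PySem.List.max? (List.map (fun x => x.2) l) (fun y => y)).getD 0) l)).length = 1 then
          (List.map Prod.fst (List.filter (fun p =>
              p.2 == (PySem.List.max? (List.map (fun x => x.2) l) (fun y => y)).getD 0) l)).getD 0 ""
        else "none" := by
  rcases hs : PySem.List.sorted l (fun d => -d.2) false with _ | ⟨a, t⟩
  · -- empty: l = []
    have hl : l = [] := by
      have := PySem.List.sorted_eq_nil_iff (xs := l) (key := fun d : String × Int => -d.2) (rev := false)
      exact this.mp hs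
    subst hl; simp
  · -- nonempty
    have hperm : (a :: t).Perm l := by
      have := PySem.List.sorted_perm (xs := l) (key := fun d : String × Int => -d.2) (rev := false)
      rw [hs] at this; exact this
    have hlen : l.length = t.length + 1 := by
      have := hperm.length_eq; simpa using this.symm
    have hmaxle : ∀ y ∈ l, y.2 ≤ a.2 := by
      intro y hy
      have := PySem.List.key_head_sorted_le (xs := l) (key := fun d : String × Int => -d.2) hs y hy
      simpa using this
    have ha_mem : a ∈ l := hperm.subset (List.mem_cons_self ..)
    -- the max of the values is a.2, the value of the sorted head
    have hm : (PySem.List.max? (List.map (fun x => x.2) l) (fun y => y)).getD 0 = a.2 := by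
      rcases hv : PySem.List.max? (List.map (fun x => x.2) l) (fun y => y) with _ | v
      · rw [PySem.List.max?_eq_none_iff] at hv
        simp at hv
        exact absurd hv (by intro h; simp [h] at hlen)
      · have hvmem : v ∈ List.map (fun x : String × Int => x.2) l := PySem.List.max?_mem hv
        have hvmax : ∀ y ∈ List.map (fun x : String × Int => x.2) l, y ≤ v := by
          intro y hy; simpa using PySem.List.max?_isMax hv y hy
        have h1 : v ≤ a.2 := by
          rcases List.mem_map.mp hvmem with ⟨p, hp, hpv⟩
          exact hpv ▸ hmaxle p hp
        have h2 : a.2 ≤ v := hvmax a.2 (List.mem_map.mpr ⟨a, ha_mem, rfl⟩)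
        rw [hv]
        simp only [Option.getD_some]
        exact le_antisymm h1 h2
    rw [hm]
    rcases t with _ | ⟨b, u⟩
    · -- exactly one entry: l = [a]
      have hl : l = [a] := List.Perm.eq_singleton hperm.symm
      subst hl
      simp
    · -- at least two entries
      have hpw : (a :: b :: u).Pairwise (fun p q : String × Int => -p.2 ≤ -q.2) := by
        have := PySem.List.sorted_pairwise (xs := l) (key := fun d : String × Int => -d.2)
        rw [hs] at this; exact this
      have hab : b.2 ≤ a.2 := by
        have := (List.pairwise_cons.mp hpw).1 b (List.mem_cons_self ..); omega
      have hbu : ∀ x ∈ u, x.2 ≤ b.2 := by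
        intro x hx
        have := (List.pairwise_cons.mp (List.pairwise_cons.mp hpw).2).1 x hx; omega
      have hfilter_perm : (l.filter (fun p => p.2 == a.2)).Perm
          ((a :: b :: u).filter (fun p => p.2 == a.2)) :=
        (hperm.symm).filter _
      by_cases hgt : b.2 < a.2
      · -- unique max: the filtered list is exactly [a]
        have hfs : (a :: b :: u).filter (fun p => p.2 == a.2) = [a] := by
          simp only [List.filter_cons]
          have hb : (b.2 == a.2) = false := by simp; omega
          rw [hb]
          simp only [beq_self_eq_true, if_true]
          have hu : u.filter (fun p => p.2 == a.2) = [] := by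
            rw [List.filter_eq_nil_iff]
            intro x hx
            have := hbu x hx; simp; omega
          simp [hu]
        have hfl : l.filter (fun p => p.2 == a.2) = [a] := by
          rw [hfs] at hfilter_perm
          exact List.Perm.eq_singleton hfilter_perm
        simp [hlen, hfl, hgt]
      · -- tied max: at least the two heads survive the filter
        have hab2 : a.2 = b.2 := by omega
        have hfl2 : 2 ≤ (l.filter (fun p => p.2 == a.2)).length := by
          have hfcons : (a :: b :: u).filter (fun p => p.2 == a.2)
              = a :: b :: (u.filter (fun p => p.2 == a.2)) := by
            have h1 : (a.2 == a.2) = true := by simp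
            have h2 : (b.2 == a.2) = true := by simp [hab2]
            simp [h1, h2]
          rw [hfilter_perm.length_eq, hfcons]
          simp only [List.length_cons]
          omega
        have hne1 : (l.filter (fun p => p.2 == a.2)).length ≠ 1 := by omega
        simp [hlen, hne1, hgt]

theorem get_hap_spec : Claim_equal_get_hap := by
  intro qnames read_to_hap trans_id gene_name _
  unfold Spec_get_hap get_hap get_hap_alt
  simp only [count_loop_eq, PySem.Dict.counter_eq_foldl, PySem.Dict.size, PySem.Dict.values]
  rw [decide_eq]
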